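-- pv_equiv track=rewrite | github.com/MegaAmoonguss/GMath-py | gmath/sequence.py | is_quadratic
-- ===== SOURCE A (Python) =====
-- def is_arithmetic(terms):
--     """
--     Checks if given terms make up an arithmetic sequence. Length of terms must be at least 3.
--     """
--     if len(terms) < 3:
--         return False
--
--     d = terms[1] - terms[0]
--     for i in range(2, len(terms)):
--         if terms[i] - terms[i - 1] != d:
--             return False
--     return True
--
-- def is_quadratic(terms):
--     """
--     Checks if given terms make up a quadratic sequence. Length of terms must be at least 4.
--     """
--     if len(terms) < 4:
--         return False
--
--     if is_arithmetic(terms):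
--         return False
--
--     diffs = []
--     for i in range(1, len(terms)):
--         diffs.append(terms[i] - terms[i - 1])
--
--     d = diffs[1] - diffs[0]
--     for i in range(2, len(diffs)):
--         if diffs[i] - diffs[i - 1] != d:
--             return False
--     return True
-- ===== SOURCE B (Python) =====
-- def _sd_const(a, b, rest, c):
--     """True iff every successive second difference along a, b, *rest equals c."""
--     if not rest:
--         return True
--     x = rest[0]
--     return (x - b) - (b - a) == c and _sd_const(b, x, rest[1:], c)
--
--
-- def is_quadratic(terms):
--     """
--     Checks if given terms make up a quadratic sequence. Length of terms must be at least 4.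
--     """
--     if len(terms) < 4:
--         return False
--     c = (terms[2] - terms[1]) - (terms[1] - terms[0])
--     return c != 0 and _sd_const(terms[1], terms[2], terms[3:], c)
-- ===== Notes on version B (the rewrite author's own statement) =====
-- stated objective: simpler
-- what changed: Single streaming pass over the terms (recursive on the tail) checking each second difference against the first one, with the arithmetic-sequence rejection folded into a final 'first second difference != 0' test, instead of A's separate is_arithmetic scan plus building an intermediate diffs list and scanning it.
import Mathlib
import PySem

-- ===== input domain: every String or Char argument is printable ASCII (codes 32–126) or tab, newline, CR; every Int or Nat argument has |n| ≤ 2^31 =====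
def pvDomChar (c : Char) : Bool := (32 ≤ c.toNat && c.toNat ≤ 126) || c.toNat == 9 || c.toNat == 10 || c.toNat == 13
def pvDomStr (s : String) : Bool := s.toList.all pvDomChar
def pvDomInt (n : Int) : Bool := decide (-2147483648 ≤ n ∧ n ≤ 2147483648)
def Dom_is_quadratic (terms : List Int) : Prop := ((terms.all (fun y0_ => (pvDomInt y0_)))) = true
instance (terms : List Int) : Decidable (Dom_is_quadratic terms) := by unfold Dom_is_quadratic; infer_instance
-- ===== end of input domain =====

-- B replaces A's three passes (is_arithmetic scan, diffs list build, diffs scan) by one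
-- recursive pass over the tail checking second differences, with the arithmetic rejection
-- folded into a final 'first second difference ≠ 0' test; objective: simpler.

-- ===== PORT A =====
def is_arithmetic (terms : List Int) : Bool :=
  if terms.length < 3 then false
  else
    let d := PySem.List.pyGetD terms 1 0 - PySem.List.pyGetD terms 0 0
    (PySem.List.pyRange 2 (terms.length : Int) 1).all
      (fun i => PySem.List.pyGetD terms i 0 - PySem.List.pyGetD terms (i - 1) 0 == d)

def is_quadratic (terms : List Int) : Bool :=
  if terms.length < 4 then false
  else if is_arithmetic terms then false
  else
    let diffs := (PySem.List.pyRange 1 (terms.length : Int) 1).foldl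
      (fun acc i => acc ++ [PySem.List.pyGetD terms i 0 - PySem.List.pyGetD terms (i - 1) 0]) []
    let d := PySem.List.pyGetD diffs 1 0 - PySem.List.pyGetD diffs 0 0
    (PySem.List.pyRange 2 (diffs.length : Int) 1).all
      (fun i => PySem.List.pyGetD diffs i 0 - PySem.List.pyGetD diffs (i - 1) 0 == d)

-- ===== PORT B =====
def sdConst (a b : Int) (rest : List Int) (c : Int) : Bool :=
  match rest with
  | [] => true
  | x :: rs => ((x - b) - (b - a) == c) && sdConst b x rs c

def is_quadratic_alt (terms : List Int) : Bool :=
  if terms.length < 4 then false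
  else
    let c := (PySem.List.pyGetD terms 2 0 - PySem.List.pyGetD terms 1 0)
             - (PySem.List.pyGetD terms 1 0 - PySem.List.pyGetD terms 0 0)
    (c != 0) && sdConst (PySem.List.pyGetD terms 1 0) (PySem.List.pyGetD terms 2 0)
                  (PySem.List.slice terms (some 3) none) c

-- ===== PRECONDITION & SPEC =====
def Spec_is_quadratic (terms : List Int) (out : Bool) : Prop := out = is_quadratic_alt terms
instance (terms : List Int) (out : Bool) : Decidable (Spec_is_quadratic terms out) := by unfold Spec_is_quadratic; infer_instance

-- ===== CLAIM (what is proved, stated in full; the proofs are below) =====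
def Claim_equal_is_quadratic : Prop := ∀ (terms : List Int), Dom_is_quadratic terms → Spec_is_quadratic terms (is_quadratic terms)

-- ===== LEMMAS AND PROOFS =====

/-- `pairAll f p xs` = f holds of every consecutive pair of `p :: xs`. -/
def pairAll (f : Int → Int → Bool) : Int → List Int → Bool
  | _, [] => true
  | p, y :: ys => f p y && pairAll f y ys

/-- `pairMap g p xs` = g mapped over consecutive pairs of `p :: xs`. -/
def pairMap (g : Int → Int → Int) : Int → List Int → List Int
  | _, [] => []
  | p, y :: ys => g p y :: pairMap g y ys

lemma pyGetD_cons_of_pos (x : Int) (xs : List Int) (i : Int) (h : 1 ≤ i) :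
    PySem.List.pyGetD (x :: xs) i 0 = PySem.List.pyGetD xs (i - 1) 0 := by
  obtain ⟨k, rfl⟩ : ∃ k : Nat, i = ((k + 1 : Nat) : Int) :=
    ⟨(i - 1).toNat, by omega⟩
  have h2 : ((k + 1 : Nat) : Int) - 1 = ((k : Nat) : Int) := by push_cast; ring
  rw [h2, PySem.List.pyGetD_natCast, PySem.List.pyGetD_natCast, List.getD_cons_succ]

lemma shift_all (d : Int) (x : Int) (xs : List Int) :
    (PySem.List.pyRange 2 (((x :: xs).length : Nat) : Int) 1).all
        (fun i => PySem.List.pyGetD (x :: xs) i 0 - PySem.List.pyGetD (x :: xs) (i - 1) 0 == d)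
      = (PySem.List.pyRange 1 ((xs.length : Nat) : Int) 1).all
        (fun i => PySem.List.pyGetD xs i 0 - PySem.List.pyGetD xs (i - 1) 0 == d) := by
  have hlen : ((x :: xs).length : Int) = (xs.length : Int) + 1 := by
    simp
  rw [Bool.eq_iff_iff, List.all_eq_true, List.all_eq_true]
  constructor
  · intro H i hi
    rw [PySem.List.mem_pyRange_one] at hi
    have := H (i + 1) (by rw [PySem.List.mem_pyRange_one]; omega)
    rw [pyGetD_cons_of_pos x xs (i + 1) (by omega),
      pyGetD_cons_of_pos x xs (i + 1 - 1) (by omega)] at this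
    have e1 : i + 1 - 1 = i := by omega
    rwa [e1] at this
  · intro H i hi
    rw [PySem.List.mem_pyRange_one] at hi
    have := H (i - 1) (by rw [PySem.List.mem_pyRange_one]; omega)
    rw [pyGetD_cons_of_pos x xs i (by omega),
      pyGetD_cons_of_pos x xs (i - 1) (by omega)]
    exact this

lemma all_pairs (d : Int) : ∀ (xs : List Int) (p : Int),
    (PySem.List.pyRange 1 (((p :: xs).length : Nat) : Int) 1).all
        (fun i => PySem.List.pyGetD (p :: xs) i 0 - PySem.List.pyGetD (p :: xs) (i - 1) 0 == d)
      = pairAll (fun a b => b - a == d) p xs := by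
  intro xs
  induction xs with
  | nil => intro p; rw [PySem.List.pyRange_one_eq_nil (by simp)]; simp [pairAll]
  | cons y ys ih =>
    intro p
    rw [PySem.List.pyRange_one_cons (by simp)]
    rw [List.all_cons]
    have h1 : PySem.List.pyGetD (p :: y :: ys) ((1 : Int) - 1) 0 = p := by
      norm_num [PySem.List.pyGetD_zero_cons]
    have h2 : PySem.List.pyGetD (p :: y :: ys) (1 : Int) 0 = y := by
      have := PySem.List.pyGetD_natCast (p :: y :: ys) 1 0; simpa using this
    rw [show (1 : Int) + 1 = 2 by norm_num, shift_all d p (y :: ys), ih y]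
    simp only [h1, h2]
    rfl

lemma shift_map (x : Int) (xs : List Int) :
    (PySem.List.pyRange 2 (((x :: xs).length : Nat) : Int) 1).map
        (fun i => PySem.List.pyGetD (x :: xs) i 0 - PySem.List.pyGetD (x :: xs) (i - 1) 0)
      = (PySem.List.pyRange 1 ((xs.length : Nat) : Int) 1).map
        (fun i => PySem.List.pyGetD xs i 0 - PySem.List.pyGetD xs (i - 1) 0) := by
  rw [PySem.List.pyRange_one, PySem.List.pyRange_one, List.map_map, List.map_map]
  have hlen : (((x :: xs).length : Nat) : Int) - 2 = ((xs.length : Nat) : Int) - 1 := by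
    simp; omega
  rw [hlen]
  apply List.map_congr_left
  intro k hk
  simp only [Function.comp]
  rw [pyGetD_cons_of_pos x xs (2 + k) (by omega),
    pyGetD_cons_of_pos x xs (2 + (k : Int) - 1) (by omega)]
  congr 2 <;> omega

lemma map_pairs : ∀ (xs : List Int) (p : Int),
    (PySem.List.pyRange 1 (((p :: xs).length : Nat) : Int) 1).map
        (fun i => PySem.List.pyGetD (p :: xs) i 0 - PySem.List.pyGetD (p :: xs) (i - 1) 0)
      = pairMap (fun a b => b - a) p xs := by
  intro xs
  induction xs with
  | nil => intro p; rw [PySem.List.pyRange_one_eq_nil (by simp)]; simp [pairMap]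
  | cons y ys ih =>
    intro p
    rw [PySem.List.pyRange_one_cons (by simp)]
    rw [List.map_cons]
    have h1 : PySem.List.pyGetD (p :: y :: ys) ((1 : Int) - 1) 0 = p := by
      norm_num [PySem.List.pyGetD_zero_cons]
    have h2 : PySem.List.pyGetD (p :: y :: ys) (1 : Int) 0 = y := by
      have := PySem.List.pyGetD_natCast (p :: y :: ys) 1 0; simpa using this
    rw [show (1 : Int) + 1 = 2 by norm_num, shift_map p (y :: ys), ih y]
    simp only [h1, h2]
    rfl

lemma pairAll_pairMap_sdConst (c : Int) : ∀ (rest : List Int) (t1 t2 : Int),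
    pairAll (fun a b => b - a == c) (t2 - t1) (pairMap (fun a b => b - a) t2 rest)
      = sdConst t1 t2 rest c := by
  intro rest
  induction rest with
  | nil => intro t1 t2; rfl
  | cons x rs ih =>
    intro t1 t2
    simp only [pairMap, pairAll, sdConst]
    rw [ih t2 x]

lemma sdConst_zero_pairAll : ∀ (rest : List Int) (t1 t2 d : Int), d = t2 - t1 →
    sdConst t1 t2 rest 0 = pairAll (fun a b => b - a == d) t2 rest := by
  intro rest
  induction rest with
  | nil => intro t1 t2 d _; rfl
  | cons x rs ih =>
    intro t1 t2 d hd
    simp only [sdConst, pairAll]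
    by_cases h : x - t2 = d
    · have h1 : ((x - t2) - (t2 - t1) == (0 : Int)) = true := by
        rw [beq_iff_eq]; omega
      have h2 : (x - t2 == d) = true := by rw [beq_iff_eq]; exact h
      rw [h1, h2, Bool.true_and, Bool.true_and, ih t2 x d (by omega)]
    · have h1 : ((x - t2) - (t2 - t1) == (0 : Int)) = false := by
        rw [beq_eq_false_iff_ne]; omega
      have h2 : (x - t2 == d) = false := by rw [beq_eq_false_iff_ne]; exact h
      rw [h1, h2, Bool.false_and, Bool.false_and]

lemma is_arithmetic_char (t0 t1 t2 : Int) (tail : List Int) :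
    is_arithmetic (t0 :: t1 :: t2 :: tail) =
      pairAll (fun a b => b - a == t1 - t0) t1 (t2 :: tail) := by
  unfold is_arithmetic
  rw [if_neg (by simp : ¬ (t0 :: t1 :: t2 :: tail).length < 3)]
  have h2 : PySem.List.pyGetD (t0 :: t1 :: t2 :: tail) (1 : Int) 0 = t1 := by
    have := PySem.List.pyGetD_natCast (t0 :: t1 :: t2 :: tail) 1 0; simpa using this
  have h0 : PySem.List.pyGetD (t0 :: t1 :: t2 :: tail) (0 : Int) 0 = t0 := by
    simp [PySem.List.pyGetD_zero_cons]
  simp only [h2, h0]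
  rw [shift_all (t1 - t0) t0 (t1 :: t2 :: tail), all_pairs (t1 - t0) (t2 :: tail) t1]

lemma diffs_char (t0 : Int) (tail : List Int) :
    (PySem.List.pyRange 1 (((t0 :: tail).length : Nat) : Int) 1).foldl
        (fun acc i => acc ++ [PySem.List.pyGetD (t0 :: tail) i 0
                              - PySem.List.pyGetD (t0 :: tail) (i - 1) 0]) []
      = pairMap (fun a b => b - a) t0 tail := by
  rw [PySem.List.foldl_append_singleton_eq_map, List.nil_append, map_pairs tail t0]

-- ===== VERDICT (by name: the statement is the Claim_ definition above) =====
theorem is_quadratic_spec : Claim_equal_is_quadratic := by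
  intro terms _
  unfold Spec_is_quadratic
  match terms with
  | [] => rfl
  | [t0] => rfl
  | [t0, t1] => rfl
  | [t0, t1, t2] => rfl
  | t0 :: t1 :: t2 :: t3 :: rest =>
    unfold is_quadratic is_quadratic_alt
    have hlen : ¬ (t0 :: t1 :: t2 :: t3 :: rest).length < 4 := by simp
    rw [if_neg hlen, if_neg hlen]
    have hslice : PySem.List.slice (t0 :: t1 :: t2 :: t3 :: rest) (some 3) none = t3 :: rest := by
      rw [show (3 : Int) = ((3 : Nat) : Int) by norm_num, PySem.List.slice_from_natCast]
      rfl
    have g0 : PySem.List.pyGetD (t0 :: t1 :: t2 :: t3 :: rest) (0 : Int) 0 = t0 := by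
      simp [PySem.List.pyGetD_zero_cons]
    have g1 : PySem.List.pyGetD (t0 :: t1 :: t2 :: t3 :: rest) (1 : Int) 0 = t1 := by
      have := PySem.List.pyGetD_natCast (t0 :: t1 :: t2 :: t3 :: rest) 1 0; simpa using this
    have g2 : PySem.List.pyGetD (t0 :: t1 :: t2 :: t3 :: rest) (2 : Int) 0 = t2 := by
      have := PySem.List.pyGetD_natCast (t0 :: t1 :: t2 :: t3 :: rest) 2 0; simpa using this
    simp only [hslice, g0, g1, g2]
    rw [diffs_char t0 (t1 :: t2 :: t3 :: rest)]
    have hD : pairMap (fun a b => b - a) t0 (t1 :: t2 :: t3 :: rest)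
        = (t1 - t0) :: (t2 - t1) :: pairMap (fun a b => b - a) t2 (t3 :: rest) := rfl
    rw [hD]
    set D2 := pairMap (fun a b => b - a) t2 (t3 :: rest) with hD2
    have d0 : PySem.List.pyGetD ((t1 - t0) :: (t2 - t1) :: D2) (0 : Int) 0 = t1 - t0 := by
      simp [PySem.List.pyGetD_zero_cons]
    have d1 : PySem.List.pyGetD ((t1 - t0) :: (t2 - t1) :: D2) (1 : Int) 0 = t2 - t1 := by
      have := PySem.List.pyGetD_natCast ((t1 - t0) :: (t2 - t1) :: D2) 1 0; simpa using this
    simp only [d0, d1]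
    rw [shift_all (t2 - t1 - (t1 - t0)) (t1 - t0) ((t2 - t1) :: D2),
      all_pairs (t2 - t1 - (t1 - t0)) D2 (t2 - t1), hD2,
      pairAll_pairMap_sdConst (t2 - t1 - (t1 - t0)) (t3 :: rest) t1 t2]
    rw [is_arithmetic_char t0 t1 t2 (t3 :: rest)]
    have hC : pairAll (fun a b => b - a == t1 - t0) t1 (t2 :: t3 :: rest)
        = ((t2 - t1 == t1 - t0) && pairAll (fun a b => b - a == t1 - t0) t2 (t3 :: rest)) := rfl
    by_cases hc : t2 - t1 - (t1 - t0) = 0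
    · have hb : (t2 - t1 == t1 - t0) = true := by rw [beq_iff_eq]; omega
      have hz : sdConst t1 t2 (t3 :: rest) (t2 - t1 - (t1 - t0)) =
          pairAll (fun a b => b - a == t1 - t0) t2 (t3 :: rest) := by
        rw [hc]; exact sdConst_zero_pairAll (t3 :: rest) t1 t2 (t1 - t0) (by omega)
      have hne : ((t2 - t1 - (t1 - t0)) != 0) = false := by
        simp [hc]
      simp only [hC, hb, Bool.true_and, hz, hne, Bool.false_and]
      cases h : pairAll (fun a b => b - a == t1 - t0) t2 (t3 :: rest) <;> simp_all
    · have hb : (t2 - t1 == t1 - t0) = false := by rw [beq_eq_false_iff_ne]; omega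
      have hne : ((t2 - t1 - (t1 - t0)) != 0) = true := by
        simp [hc]
      simp [hC, hb, hne]
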